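-- pv_equiv track=rewrite | github.com/J-Gottschalk-NZ/2023-debugging-code | C_21_unlucky_7s.py | sum_unlucky_7
-- ===== SOURCE A (Python) =====
-- def sum_unlucky_7(numbers):
--     total = 0
--     ignore_next = False
--     for num in numbers:
--         if num == 7:
--             ignore_next = True
--         else:
--             if ignore_next:
--                 ignore_next = False
--                 total += num
--
--     return total
-- ===== SOURCE B (Python) =====
-- def sum_unlucky_7(numbers):
--     return sum(b for a, b in zip(numbers, numbers[1:]) if a == 7 and b != 7)
-- ===== Notes on version B (the rewrite author's own statement) =====
-- stated objective: simpler
-- what changed: Replaces the ignore_next flag state machine with a stateless pairwise pass: sum the second element of each consecutive pair whose first element is 7 and second is not.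
import Mathlib
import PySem

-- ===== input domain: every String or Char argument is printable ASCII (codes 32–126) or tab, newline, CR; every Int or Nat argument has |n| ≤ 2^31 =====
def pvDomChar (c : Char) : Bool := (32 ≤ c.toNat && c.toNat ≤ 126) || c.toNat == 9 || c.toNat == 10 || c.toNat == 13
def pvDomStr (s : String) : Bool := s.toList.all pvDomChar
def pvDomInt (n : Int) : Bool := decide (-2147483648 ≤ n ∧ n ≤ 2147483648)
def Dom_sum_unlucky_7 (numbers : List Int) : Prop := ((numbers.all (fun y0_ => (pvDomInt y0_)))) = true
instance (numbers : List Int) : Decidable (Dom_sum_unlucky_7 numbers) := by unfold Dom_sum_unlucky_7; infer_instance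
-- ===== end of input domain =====

-- B replaces A's ignore_next state machine with a stateless sum over consecutive pairs (simpler decomposition).

-- ===== PORT A =====
-- total/ignore_next loop, literally as a fold over the pair state
def sum_unlucky_7 (numbers : List Int) : Int :=
  (numbers.foldl
    (fun s num =>
      if num = 7 then (s.1, true)
      else if s.2 then (s.1 + num, false) else (s.1, false))
    (0, false)).1

-- ===== PORT B =====
-- sum(b for a, b in zip(numbers, numbers[1:]) if a == 7 and b != 7)
def sum_unlucky_7_alt (numbers : List Int) : Int :=
  (((numbers.zip (PySem.List.slice numbers (some 1) none)).filter
      (fun p => p.1 == 7 && p.2 != 7)).map (fun p => p.2)).sum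

-- ===== PRECONDITION & SPEC =====
def Spec_sum_unlucky_7 (numbers : List Int) (out : Int) : Prop := out = sum_unlucky_7_alt numbers
instance (numbers : List Int) (out : Int) : Decidable (Spec_sum_unlucky_7 numbers out) := by unfold Spec_sum_unlucky_7; infer_instance

-- ===== CLAIM (what is proved, stated in full; the proofs are below) =====
def Claim_equal_sum_unlucky_7 : Prop := ∀ (numbers : List Int), Dom_sum_unlucky_7 numbers → Spec_sum_unlucky_7 numbers (sum_unlucky_7 numbers)

-- ===== LEMMAS AND PROOFS =====

-- contribution of the rest of the list given whether the previous element was 7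
def pvAux (ig : Bool) : List Int → Int
  | [] => 0
  | x :: xs => (if ig ∧ x ≠ 7 then x else 0) + pvAux (decide (x = 7)) xs

lemma pvFold_eq (l : List Int) (t : Int) (ig : Bool) :
    (l.foldl
      (fun s num =>
        if num = 7 then (s.1, true)
        else if s.2 then (s.1 + num, false) else (s.1, false))
      (t, ig)).1 = t + pvAux ig l := by
  induction l generalizing t ig with
  | nil => simp [pvAux]
  | cons x xs ih =>
    simp only [List.foldl_cons, pvAux]
    by_cases hx : x = 7
    · simp [hx, ih]
    · cases ig
      · simp [hx, ih]
      · simp [hx, ih]; ring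

lemma pvAux_eq_alt (x : Int) (xs : List Int) :
    pvAux (decide (x = 7)) xs = sum_unlucky_7_alt (x :: xs) := by
  induction xs generalizing x with
  | nil => simp [pvAux, sum_unlucky_7_alt, PySem.List.slice_from_one]
  | cons y ys ih =>
    simp only [pvAux, sum_unlucky_7_alt, PySem.List.slice_from_one, List.tail] at *
    have h := ih y
    by_cases hy : y = 7
    · subst hy
      norm_num at h
      by_cases hx : x = 7 <;> simpa [hx, List.zip_cons_cons] using h
    · by_cases hx : x = 7 <;> simp [hx, hy, List.zip_cons_cons, ← h]

-- ===== VERDICT (by name: the statement is the Claim_ definition above) =====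
theorem sum_unlucky_7_spec : Claim_equal_sum_unlucky_7 := by
  intro numbers _
  unfold Spec_sum_unlucky_7
  cases numbers with
  | nil => rfl
  | cons x xs =>
    unfold sum_unlucky_7
    simp only [List.foldl_cons]
    have h1 : (if x = 7 then ((0:Int), true)
        else if (false : Bool) = true then ((0:Int) + x, false) else ((0:Int), false))
        = ((0:Int), decide (x = 7)) := by
      by_cases hx : x = 7 <;> simp [hx]
    rw [h1, pvFold_eq, zero_add, pvAux_eq_alt]
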